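-- pv_equiv track=rewrite | github.com/dmendelsohn/advent_of_code | python/src/year2021/day03/solution.py | iterative_filter
-- ===== SOURCE A (Python) =====
-- from typing import List
--
-- def count_zeros_at_pos(binary_strs: List[str], pos: int) -> int:
--     return sum(1 for binary_str in binary_strs if binary_str[pos] == "0")
--
-- def get_most_common_at_pos(binary_strs: List[str], pos: int) -> str:
--     num_zeros = count_zeros_at_pos(binary_strs, pos)
--     num_ones = len(binary_strs) - num_zeros
--     return "0" if num_zeros > num_ones else "1"
--
-- def filter_binaries(binary_strs: List[str], pos: int, match_digit: str) -> List[str]: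
--     return [binary for binary in binary_strs if binary[pos] == match_digit]
--
-- def iterative_filter(binary_strs: List[str], is_min_filter: bool) -> str:
--     for pos in range(len(binary_strs[0])):
--         if len(binary_strs) == 1:
--             break
--         match_digit = get_most_common_at_pos(binary_strs, pos)
--         if is_min_filter:
--             match_digit = str(1 - int(match_digit))
--         binary_strs = filter_binaries(binary_strs, pos, match_digit)
--
--     if len(binary_strs) == 1:
--         return binary_strs[0]
--     else:
--         raise RuntimeError(f"Error while filtering, left with: {binary_strs}")
-- ===== SOURCE B (Python) =====
-- # Alternative implementation: one prefix-count index (a trie flattened into a dict)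
-- # built in a single pass, then a greedy walk over prefixes (majority child = more than
-- # half of this node's strings), and a single final startswith scan; equivalence is about
-- # the return value (neither implementation mutates its arguments).
-- def iterative_filter(binary_strs, is_min_filter):
--     width = len(binary_strs[0])
--     prefix_count = {}
--     for s in binary_strs:
--         for k in range(len(s) + 1):
--             p = s[:k]
--             prefix_count[p] = prefix_count.get(p, 0) + 1
--     prefix = ""
--     for _pos in range(width):
--         if prefix_count.get(prefix, 0) == 1:
--             break
--         total = prefix_count.get(prefix, 0)
--         zeros = prefix_count.get(prefix + "0", 0)
--         bit = "0" if zeros > total - zeros else "1"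
--         if is_min_filter:
--             bit = "1" if bit == "0" else "0"
--         prefix += bit
--     candidates = [s for s in binary_strs if s.startswith(prefix)]
--     if len(candidates) == 1:
--         return candidates[0]
--     raise RuntimeError(f"Error while filtering, left with: {candidates}")
-- ===== Notes on version B (the rewrite author's own statement) =====
-- stated objective: alternative
-- what changed: Replaces the repeated count-then-filter passes over the shrinking list with a prefix-count index (a trie flattened into a dict) built in one pass, a greedy walk over prefixes that compares each node's '0'-child count with the rest of its subtree via dict lookups only, and a single final startswith scan.
import Mathlib
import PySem

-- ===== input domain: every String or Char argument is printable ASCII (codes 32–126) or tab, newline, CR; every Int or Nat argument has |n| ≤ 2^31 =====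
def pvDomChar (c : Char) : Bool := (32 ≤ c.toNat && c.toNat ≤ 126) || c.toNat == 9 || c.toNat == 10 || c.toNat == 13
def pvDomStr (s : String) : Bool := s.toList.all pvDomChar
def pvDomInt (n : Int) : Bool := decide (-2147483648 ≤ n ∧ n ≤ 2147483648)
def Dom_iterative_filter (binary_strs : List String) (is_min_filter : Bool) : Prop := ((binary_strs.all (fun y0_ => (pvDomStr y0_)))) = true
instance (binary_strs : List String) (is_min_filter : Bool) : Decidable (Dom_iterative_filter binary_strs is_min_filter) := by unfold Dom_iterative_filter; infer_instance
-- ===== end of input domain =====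

-- B replaces A's repeated count-then-filter passes by a prefix-count index (a flattened
-- trie dict) built once, a greedy walk over prefixes, and one final startswith scan;
-- same cost class, genuinely different data structure (objective: alternative).


-- ===== PORT A =====
-- sum(1 for b in binary_strs if b[pos] == "0")  (b[pos] is a one-char string; compared as its Char)
def pvCountZerosAtPos (binary_strs : List String) (pos : Int) : Int :=
  binary_strs.foldl (fun acc b => if PySem.Str.pyGet? b pos = some '0' then acc + 1 else acc) 0

def pvGetMostCommonAtPos (binary_strs : List String) (pos : Int) : String :=
  let num_zeros := pvCountZerosAtPos binary_strs pos
  let num_ones := (binary_strs.length : Int) - num_zeros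
  if num_ones < num_zeros then "0" else "1"

-- [b for b in binary_strs if b[pos] == match_digit]
def pvFilterBinaries (binary_strs : List String) (pos : Int) (match_digit : String) : List String :=
  binary_strs.filter (fun b => (PySem.Str.pyGet? b pos).map (fun c => String.ofList [c]) = some match_digit)

-- one iteration of A's for-loop; 'break' once a single string remains = leave the state unchanged
def pvStepA (is_min_filter : Bool) (strs : List String) (pos : Int) : List String :=
  if strs.length = 1 then strs
  else
    let md := pvGetMostCommonAtPos strs pos
    let md := if is_min_filter then PySem.Int.toStr (1 - (PySem.Int.ofStr? md).getD 0) else md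
    pvFilterBinaries strs pos md

def iterative_filter (binary_strs : List String) (is_min_filter : Bool) : String :=
  -- range(len(binary_strs[0])); the IndexError on an empty list is excluded by Pre_
  let w : Int := (((PySem.List.pyGet? binary_strs 0).getD "").toList.length : Int)
  let final := (PySem.List.pyRange 0 w 1).foldl (pvStepA is_min_filter) binary_strs
  -- 'raise RuntimeError' is excluded by Pre_; "" stands in for it
  if final.length = 1 then (PySem.List.pyGet? final 0).getD "" else ""

-- ===== PORT B =====
-- prefix_count[p] = prefix_count.get(p, 0) + 1 for every prefix p = s[:k] of every s
-- (strings are handled as their code-point lists, PySem's string representation)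
def pvBuildPrefixCount (strs : List String) : PySem.Dict (List Char) Int :=
  strs.foldl (fun d s =>
    (PySem.List.pyRange 0 ((s.toList.length : Int) + 1) 1).foldl
      (fun d k =>
        let p := PySem.List.slice s.toList none (some k)
        d.insert p (d.getD p 0 + 1)) d)
    PySem.Dict.empty

-- one iteration of B's walk; 'break' once the prefix covers a single string
def pvStepB (is_min_filter : Bool) (pc : PySem.Dict (List Char) Int) (w : List Char) (_pos : Int) : List Char :=
  if pc.getD w 0 = 1 then w
  else
    let total := pc.getD w 0
    let zeros := pc.getD (w ++ ['0']) 0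
    let bit : Char := if total - zeros < zeros then '0' else '1'
    let bit := if is_min_filter then (if bit = '0' then '1' else '0') else bit
    w ++ [bit]

def iterative_filter_alt (binary_strs : List String) (is_min_filter : Bool) : String :=
  let width : Int := (((PySem.List.pyGet? binary_strs 0).getD "").toList.length : Int)
  let pc := pvBuildPrefixCount binary_strs
  let pfx := (PySem.List.pyRange 0 width 1).foldl (pvStepB is_min_filter pc) []
  let candidates := binary_strs.filter (fun s => PySem.Chars.startswith s.toList pfx)
  -- len(candidates) != 1 is B's RuntimeError, excluded by Pre_; "" stands in for it
  if candidates.length = 1 then (PySem.List.pyGet? candidates 0).getD "" else ""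

-- ===== PRECONDITION & SPEC =====
-- number of strings having p as a prefix
def pvNumWith (strs : List String) (p : List Char) : Nat :=
  (strs.filter (fun t => p.isPrefixOf t.toList)).length

-- the digit A's bit criterion selects below prefix p ("most common, ties to 1", flipped for min)
def pvChoose (is_min_filter : Bool) (strs : List String) (p : List Char) : Char :=
  let total : Int := pvNumWith strs p
  let zeros : Int := pvNumWith strs (p ++ ['0'])
  let most : Char := if total - zeros < zeros then '0' else '1'
  if is_min_filter then (if most = '0' then '1' else '0') else most

-- Pre_ is exactly the set of inputs on which A returns normally (everywhere else A raises
-- IndexError or RuntimeError): some input string s has a prefix of length k that it alone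
-- carries, every shorter prefix of s being shared (so no earlier stop), greedily chosen by
-- the bit criterion, and with no shared-prefix string too short to be indexed (no IndexError).
def Pre_iterative_filter (binary_strs : List String) (is_min_filter : Bool) : Prop :=
  binary_strs ≠ [] ∧
  ∃ s ∈ binary_strs, ∃ k < (binary_strs.headD "").toList.length + 1,
    k ≤ s.toList.length ∧
    pvNumWith binary_strs (s.toList.take k) = 1 ∧
    ∀ j < k,
      pvNumWith binary_strs (s.toList.take j) ≠ 1 ∧
      (∀ t ∈ binary_strs, (s.toList.take j) <+: t.toList → j < t.toList.length) ∧
      s.toList[j]? = some (pvChoose is_min_filter binary_strs (s.toList.take j))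
instance (binary_strs : List String) (is_min_filter : Bool) : Decidable (Pre_iterative_filter binary_strs is_min_filter) := by unfold Pre_iterative_filter; infer_instance

def pvWitness_iterative_filter : List String × Bool := (["01", "10"], true)

def Spec_iterative_filter (binary_strs : List String) (is_min_filter : Bool) (out : String) : Prop := out = iterative_filter_alt binary_strs is_min_filter
instance (binary_strs : List String) (is_min_filter : Bool) (out : String) : Decidable (Spec_iterative_filter binary_strs is_min_filter out) := by unfold Spec_iterative_filter; infer_instance

-- ===== CLAIM (what is proved, stated in full; the proofs are below) =====
def Claim_equal_iterative_filter : Prop := ∀ (binary_strs : List String) (is_min_filter : Bool), Dom_iterative_filter binary_strs is_min_filter → Pre_iterative_filter binary_strs is_min_filter → Spec_iterative_filter binary_strs is_min_filter (iterative_filter binary_strs is_min_filter)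

-- ===== LEMMAS AND PROOFS =====

-- the strings of strs that start with prefix w (B's candidates / A's surviving set)
def pvFil (strs : List String) (w : List Char) : List String :=
  strs.filter (fun s => PySem.Chars.startswith s.toList w)

theorem pvCountPrefixes (cs w : List Char) :
    ((List.range (cs.length + 1)).map (fun k => cs.take k)).count w
      = if w <+: cs then 1 else 0 := by
  rw [List.count, List.countP_map]
  by_cases h : w <+: cs
  · have hlen : w.length < cs.length + 1 := Nat.lt_succ_of_le h.length_le
    rw [if_pos h]
    have hc : ∀ k ∈ List.range (cs.length + 1),
        (((fun k => cs.take k == w) ∘ (fun k => k)) k = true ↔ (k == w.length) = true) := by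
      intro k hk
      rw [List.mem_range] at hk
      by_cases hkw : k = w.length
      · subst hkw
        simp [(List.prefix_iff_eq_take.mp h).symm]
      · simp only [Function.comp]
        have : ¬ cs.take k = w := by
          intro he
          apply hkw
          have := congrArg List.length he
          rw [List.length_take] at this
          omega
        simp [this, hkw]
    calc List.countP ((fun k => cs.take k == w) ∘ (fun k => k)) (List.range (cs.length + 1))
        = List.countP (fun k => k == w.length) (List.range (cs.length + 1)) :=
          List.countP_congr hc
      _ = List.count w.length (List.range (cs.length + 1)) := rfl
      _ = 1 := List.count_eq_one_of_mem (List.nodup_range) (List.mem_range.mpr hlen)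
  · rw [if_neg h]
    apply List.countP_eq_zero.mpr
    intro k _
    simp only [Function.comp, beq_iff_eq]
    intro he
    exact h (he ▸ List.take_prefix k cs)

theorem pvBuildInner (s : String) (d : PySem.Dict (List Char) Int) (w : List Char) :
    ((PySem.List.pyRange 0 ((s.toList.length : Int) + 1) 1).foldl
      (fun d k =>
        let p := PySem.List.slice s.toList none (some k)
        d.insert p (d.getD p 0 + 1)) d).getD w 0
      = d.getD w 0 + (if PySem.Chars.startswith s.toList w then 1 else 0) := by
  have h1 : ((s.toList.length : Int) + 1) = ((s.toList.length + 1 : Nat) : Int) := by push_cast; ring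
  rw [h1, PySem.List.pyRange_zero]
  have h2 : ((s.toList.length + 1 : Nat) : Int).toNat = s.toList.length + 1 := by omega
  rw [h2, List.foldl_map]
  rw [show (fun (x : PySem.Dict (List Char) Int) (y : Nat) =>
        let p := PySem.List.slice s.toList none (some ((y : Nat) : Int));
        x.insert p (x.getD p 0 + 1))
      = (fun (x : PySem.Dict (List Char) Int) (y : Nat) =>
        x.insert (s.toList.take y) (x.getD (s.toList.take y) 0 + 1)) from by
      funext x y
      simp [PySem.List.slice_to_natCast]]
  rw [← List.foldl_map (f := fun k => s.toList.take k)
        (g := fun (x : PySem.Dict (List Char) Int) (p : List Char) =>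
          x.insert p (x.getD p 0 + 1))]
  rw [PySem.Dict.getD_foldl_insert_add_one, pvCountPrefixes]
  by_cases h : w <+: s.toList
  · simp [h, (PySem.Chars.startswith_iff s.toList w).mpr h]
  · have : PySem.Chars.startswith s.toList w = false := by
      rw [← Bool.not_eq_true, PySem.Chars.startswith_iff]; exact h
    simp [h, this]

theorem pvBuild_getD_gen (strs : List String) (d : PySem.Dict (List Char) Int) (w : List Char) :
    (strs.foldl (fun d s =>
        (PySem.List.pyRange 0 ((s.toList.length : Int) + 1) 1).foldl
          (fun d k =>
            let p := PySem.List.slice s.toList none (some k)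
            d.insert p (d.getD p 0 + 1)) d) d).getD w 0
      = d.getD w 0 + ((pvFil strs w).length : Int) := by
  induction strs generalizing d with
  | nil => simp [pvFil]
  | cons s t ih =>
    rw [List.foldl_cons, ih, pvBuildInner]
    unfold pvFil
    by_cases h : PySem.Chars.startswith s.toList w
    · simp [h]; ring
    · simp only [Bool.not_eq_true] at h
      simp [h]

theorem pvBuild_getD (strs : List String) (w : List Char) :
    (pvBuildPrefixCount strs).getD w 0 = ((pvFil strs w).length : Int) := by
  unfold pvBuildPrefixCount
  rw [pvBuild_getD_gen]
  simp [PySem.Dict.getD_empty]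

theorem pvStepA_frozen (m : Bool) (l : List Int) (S : List String) (h : S.length = 1) :
    l.foldl (pvStepA m) S = S := by
  induction l with
  | nil => rfl
  | cons x t ih => rw [List.foldl_cons]; rw [show pvStepA m S x = S by simp [pvStepA, h]]; exact ih

theorem pvStepB_frozen (m : Bool) (pc : PySem.Dict (List Char) Int) (l : List Int)
    (w : List Char) (h : pc.getD w 0 = 1) : l.foldl (pvStepB m pc) w = w := by
  induction l with
  | nil => rfl
  | cons x t ih => rw [List.foldl_cons]; rw [show pvStepB m pc w x = w by simp [pvStepB, h]]; exact ih

theorem pvPrefix_snoc (w : List Char) (c : Char) (xs : List Char) (h : w.length < xs.length) :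
    (w ++ [c]) <+: xs ↔ (w <+: xs ∧ xs[w.length]? = some c) := by
  constructor
  · intro hp
    obtain ⟨r, hr⟩ := hp
    have hxs : xs = w ++ (c :: r) := by rw [← hr]; simp
    constructor
    · exact ⟨c :: r, hxs.symm⟩
    · rw [hxs, List.getElem?_append_right (le_refl _)]
      simp
  · rintro ⟨⟨r, hr⟩, hg⟩
    subst hr
    rw [List.getElem?_append_right (le_refl _)] at hg
    simp only [Nat.sub_self] at hg
    cases r with
    | nil => simp at hg
    | cons c' r' =>
      simp only [List.getElem?_cons_zero, Option.some.injEq] at hg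
      subst hg
      exact ⟨r', by simp⟩

theorem pvFil_snoc (strs : List String) (w : List Char)
    (hw : ∀ t ∈ strs, w <+: t.toList → w.length < t.toList.length) (c : Char) :
    pvFil strs (w ++ [c])
      = (pvFil strs w).filter (fun s => s.toList[w.length]? = some c) := by
  unfold pvFil
  rw [List.filter_filter]
  apply List.filter_congr
  intro s hs
  by_cases h2 : w <+: s.toList
  · have h := pvPrefix_snoc w c s.toList (hw s hs h2)
    by_cases h1 : (w ++ [c]) <+: s.toList
    · have ⟨h2', h3⟩ := h.mp h1
      simp [(PySem.Chars.startswith_iff _ _).mpr h1, (PySem.Chars.startswith_iff _ _).mpr h2', h3]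
    · have h1' : PySem.Chars.startswith s.toList (w ++ [c]) = false := by
        rw [← Bool.not_eq_true, PySem.Chars.startswith_iff]; exact h1
      have : ¬ s.toList[w.length]? = some c := fun hg => h1 (h.mpr ⟨h2, hg⟩)
      simp [h1', this]
  · have h2' : PySem.Chars.startswith s.toList w = false := by
      rw [← Bool.not_eq_true, PySem.Chars.startswith_iff]; exact h2
    have h1 : ¬ (w ++ [c]) <+: s.toList := fun hp => h2 ((List.prefix_append w [c]).trans hp)
    have h1' : PySem.Chars.startswith s.toList (w ++ [c]) = false := by
      rw [← Bool.not_eq_true, PySem.Chars.startswith_iff]; exact h1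
    simp [h1', h2']

theorem pvFil_length (strs : List String) (p : List Char) :
    (pvFil strs p).length = pvNumWith strs p := by
  unfold pvNumWith
  rw [show pvFil strs p = strs.filter (fun t => p.isPrefixOf t.toList) from by
    unfold pvFil
    apply List.filter_congr
    intro t _
    by_cases h : p <+: t.toList
    · simp [(PySem.Chars.startswith_iff _ _).mpr h, List.isPrefixOf_iff_prefix.mpr h]
    · have h1 : PySem.Chars.startswith t.toList p = false := by
        rw [← Bool.not_eq_true, PySem.Chars.startswith_iff]; exact h
      have h2 : p.isPrefixOf t.toList = false := by
        rw [← Bool.not_eq_true, List.isPrefixOf_iff_prefix]; exact h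
      simp [h1, h2]]

theorem pvFilterBinaries_eq (S : List String) (a : Nat) (c : Char) :
    pvFilterBinaries S (a : Int) (String.ofList [c])
      = S.filter (fun s => s.toList[a]? = some c) := by
  unfold pvFilterBinaries
  apply List.filter_congr
  intro s _
  rw [PySem.Str.pyGet?_natCast]
  cases hg : s.toList[a]? with
  | none => simp
  | some c' =>
    simp only [Option.map_some, Option.some.injEq]
    by_cases hc : c' = c
    · subst hc; simp
    · have : ¬ String.ofList [c'] = String.ofList [c] := by
        intro he
        apply hc
        have := congrArg String.toList he
        simpa using this
      simp [this, hc]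

theorem pvCountZeros_eq (S : List String) (a : Nat) :
    pvCountZerosAtPos S (a : Int)
      = ((S.countP (fun s => s.toList[a]? = some '0')) : Int) := by
  unfold pvCountZerosAtPos
  rw [PySem.List.foldl_ite_add_one]
  simp

theorem pvWalk (strs : List String) (m : Bool) (width : Nat) (s : String) (k : Nat)
    (hks : k ≤ s.toList.length)
    (hN1 : pvNumWith strs (s.toList.take k) = 1)
    (hstep : ∀ j < k,
      pvNumWith strs (s.toList.take j) ≠ 1 ∧
      (∀ t ∈ strs, (s.toList.take j) <+: t.toList → j < t.toList.length) ∧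
      s.toList[j]? = some (pvChoose m strs (s.toList.take j))) :
    ∀ n j, j + n = width → j ≤ k →
      (PySem.List.pyRange (j : Int) (width : Int) 1).foldl (pvStepA m) (pvFil strs (s.toList.take j)) =
      pvFil strs ((PySem.List.pyRange (j : Int) (width : Int) 1).foldl
        (pvStepB m (pvBuildPrefixCount strs)) (s.toList.take j)) := by
  intro n
  induction n with
  | zero =>
    intro j hj _
    have hr : PySem.List.pyRange (j : Int) (width : Int) 1 = [] := by
      rw [List.eq_nil_iff_forall_not_mem]
      intro x hx
      have := PySem.List.mem_pyRange_one.mp hx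
      omega
    rw [hr]
    rfl
  | succ n ih =>
    intro j hj hjk
    have hjw : j < width := by omega
    have hcast : ((j : Int) + 1) = ((j + 1 : Nat) : Int) := by push_cast; ring
    rw [PySem.List.pyRange_one_cons (by exact_mod_cast hjw), List.foldl_cons, List.foldl_cons]
    set w := s.toList.take j with hwdef
    have hwlen : w.length = j := by
      rw [hwdef, List.length_take]; omega
    set S := pvFil strs w with hS
    have hSN : S.length = pvNumWith strs w := pvFil_length strs w
    have hsize : (pvBuildPrefixCount strs).getD w 0 = (S.length : Int) := pvBuild_getD strs w
    by_cases hjk1 : j = k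
    · have h1 : S.length = 1 := by rw [hSN, hwdef, hjk1]; exact hN1
      rw [show pvStepA m S (j : Int) = S by simp [pvStepA, h1]]
      rw [show pvStepB m (pvBuildPrefixCount strs) w (j : Int) = w by
        simp [pvStepB, hsize, h1]]
      rw [pvStepA_frozen m _ S h1, pvStepB_frozen m _ _ w (by rw [hsize, h1]; rfl)]
    · have hjk' : j < k := lt_of_le_of_ne hjk hjk1
      obtain ⟨hne1, hlong, hbit⟩ := hstep j hjk'
      have h1 : S.length ≠ 1 := by rw [hSN, hwdef]; exact hne1
      have hmem : ∀ t ∈ S, t ∈ strs := fun t ht => List.mem_of_mem_filter ht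
      have hw' : ∀ t ∈ strs, w <+: t.toList → w.length < t.toList.length := by
        intro t ht hp
        rw [hwlen]
        exact hlong t ht (hwdef ▸ hp)
      have hzfil : pvFil strs (w ++ ['0'])
          = S.filter (fun t => t.toList[j]? = some '0') := by
        rw [pvFil_snoc strs w hw' '0', hwlen]
      have hz : (pvBuildPrefixCount strs).getD (w ++ ['0']) 0
          = ((S.countP (fun t => t.toList[j]? = some '0')) : Int) := by
        rw [pvBuild_getD, hzfil, ← List.countP_eq_length_filter]
      set nz := S.countP (fun t => t.toList[j]? = some '0') with hnz
      -- the digit chosen by the certificate, computed from the same two counts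
      have hchoose : pvChoose m strs w
          = (if m then (if ((S.length : Int) - (nz : Int) < (nz : Int)) then '1' else '0')
             else (if ((S.length : Int) - (nz : Int) < (nz : Int)) then '0' else '1')) := by
        unfold pvChoose
        have e1 : (pvNumWith strs w : Int) = (S.length : Int) := by rw [hSN]
        have e2 : (pvNumWith strs (w ++ ['0']) : Int) = (nz : Int) := by
          rw [← pvFil_length, hzfil, ← List.countP_eq_length_filter, hnz]
        simp only [e1, e2]
        cases m <;> by_cases hlt : ((S.length : Int) - (nz : Int) < (nz : Int)) <;>
          simp [hlt]
      have hmd : pvGetMostCommonAtPos S (j : Int)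
          = if ((S.length : Int) - (nz : Int) < (nz : Int)) then "0" else "1" := by
        unfold pvGetMostCommonAtPos
        rw [pvCountZeros_eq, ← hnz]
      have hflip0 : PySem.Int.toStr (1 - (PySem.Int.ofStr? "0").getD 0) = "1" := by decide
      have hflip1 : PySem.Int.toStr (1 - (PySem.Int.ofStr? "1").getD 0) = "0" := by decide
      have h0s : pvFilterBinaries S (j : Int) "0" = S.filter (fun t => t.toList[j]? = some '0') :=
        pvFilterBinaries_eq S j '0'
      have h1s : pvFilterBinaries S (j : Int) "1" = S.filter (fun t => t.toList[j]? = some '1') :=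
        pvFilterBinaries_eq S j '1'
      have hstepA : pvStepA m S (j : Int)
          = S.filter (fun t => t.toList[j]? = some (pvChoose m strs w)) := by
        unfold pvStepA
        rw [if_neg h1]
        simp only [hmd, hchoose]
        cases m <;> by_cases hlt : ((S.length : Int) - (nz : Int) < (nz : Int)) <;>
          simp only [hlt, if_true, if_false, Bool.false_eq_true, hflip0, hflip1, h0s, h1s]
      have hstepB : pvStepB m (pvBuildPrefixCount strs) w (j : Int)
          = w ++ [pvChoose m strs w] := by
        simp only [pvStepB, hsize, hz, hchoose]
        rw [if_neg (by exact_mod_cast fun he => h1 (by exact_mod_cast he))]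
        cases m <;> by_cases hlt : ((S.length : Int) - (nz : Int) < (nz : Int)) <;>
          simp [hlt]
      rw [hstepA, hstepB]
      have hcw : pvChoose m strs w = pvChoose m strs (s.toList.take j) := by rw [hwdef]
      have hsucc : w ++ [pvChoose m strs w] = s.toList.take (j + 1) := by
        rw [List.take_add_one, hwdef, hcw]
        rw [show s.toList[j]?.toList = [pvChoose m strs (s.toList.take j)] by
          rw [hbit]; rfl]
      have hfil : S.filter (fun t => t.toList[j]? = some (pvChoose m strs w))
          = pvFil strs (s.toList.take (j + 1)) := by
        rw [← hsucc, pvFil_snoc strs w hw' _, hwlen]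
      rw [hfil, hsucc, hcast]
      exact ih (j + 1) (by omega) (by omega)

theorem pvStartswith_nil (t : List Char) : PySem.Chars.startswith t [] = true :=
  (PySem.Chars.startswith_iff t []).mpr (List.nil_prefix)

theorem iterative_filter_spec : Claim_equal_iterative_filter := by
  intro strs m _ hpre
  unfold Spec_iterative_filter
  obtain ⟨hne, s, hs, k, hkw, hks, hN1, hstep⟩ := hpre
  simp only [iterative_filter, iterative_filter_alt]
  have hL0 : ((PySem.List.pyGet? strs 0).getD "") = strs.headD "" := by
    cases strs with
    | nil => exact absurd rfl hne
    | cons h t => simp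
  have hwalk := pvWalk strs m (strs.headD "").toList.length s k hks hN1 hstep
    (strs.headD "").toList.length 0 (by omega) (by omega)
  have htake0 : s.toList.take 0 = [] := rfl
  rw [htake0] at hwalk
  have hfilnil : pvFil strs [] = strs := by
    unfold pvFil; simp [pvStartswith_nil]
  rw [hfilnil] at hwalk
  rw [hL0]
  rw [show ((0 : Nat) : Int) = (0 : Int) from rfl] at hwalk
  rw [hwalk]
  rfl
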